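-- pv_equiv track=rewrite | github.com/chourmovs/RFPmasterApi | rfp_api_app.py | _soft_pretty_chunk
-- ===== SOURCE A (Python) =====
-- from typing import Dict, Any, Tuple, Optional, Callable, List
--
-- def _soft_pretty_chunk(chunk: str, indent_level: int) -> Tuple[str, int]:
--     out: List[str] = []
--     i = 0
--     in_string, escape = False, False
--
--     while i < len(chunk):
--         ch = chunk[i]
--         if in_string:
--             out.append(ch)
--             if escape:
--                 escape = False
--             elif ch == "\\":
--                 escape = True
--             elif ch == '"':
--                 in_string = False
--             i += 1
--             continue
--
--         if ch == '"':
--             in_string = True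
--             out.append(ch)
--         elif ch in "{[":
--             out.append(ch)
--             out.append("\n")
--             indent_level += 1
--             out.append("  " * indent_level)
--         elif ch in "}]":
--             out.append("\n")
--             indent_level = max(0, indent_level - 1)
--             out.append("  " * indent_level)
--             out.append(ch)
--         elif ch == ",":
--             out.append(ch)
--             out.append("\n")
--             out.append("  " * indent_level)
--         else:
--             out.append(ch)
--         i += 1
--
--     return "".join(out), indent_level
-- ===== SOURCE B (Python) =====
-- def _soft_pretty_chunk(chunk, indent_level):
--     out = []
--     i = 0
--     n = len(chunk)
--     while i < n:
--         ch = chunk[i]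
--         if ch == '"':
--             # consume the whole string literal in one nested scan
--             out.append(ch)
--             i += 1
--             while i < n:
--                 c = chunk[i]
--                 if c == '\\':
--                     out.append(c)
--                     if i + 1 < n:
--                         out.append(chunk[i + 1])
--                     i += 2
--                     continue
--                 out.append(c)
--                 i += 1
--                 if c == '"':
--                     break
--         elif ch in "{[":
--             indent_level += 1
--             out.append(ch + "\n" + "  " * indent_level)
--             i += 1
--         elif ch in "}]":
--             indent_level = max(0, indent_level - 1)
--             out.append("\n" + "  " * indent_level + ch)
--             i += 1
--         elif ch == ",":
--             out.append(ch + "\n" + "  " * indent_level)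
--             i += 1
--         else:
--             out.append(ch)
--             i += 1
--     return "".join(out), indent_level
-- ===== Notes on version B (the rewrite author's own statement) =====
-- stated objective: simpler
-- what changed: Removed the in_string/escape boolean state threaded through every iteration; B consumes each whole quoted string literal with a nested inner scan (handling backslash escapes pairwise) and the outer loop only handles structural tokens.
import Mathlib
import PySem

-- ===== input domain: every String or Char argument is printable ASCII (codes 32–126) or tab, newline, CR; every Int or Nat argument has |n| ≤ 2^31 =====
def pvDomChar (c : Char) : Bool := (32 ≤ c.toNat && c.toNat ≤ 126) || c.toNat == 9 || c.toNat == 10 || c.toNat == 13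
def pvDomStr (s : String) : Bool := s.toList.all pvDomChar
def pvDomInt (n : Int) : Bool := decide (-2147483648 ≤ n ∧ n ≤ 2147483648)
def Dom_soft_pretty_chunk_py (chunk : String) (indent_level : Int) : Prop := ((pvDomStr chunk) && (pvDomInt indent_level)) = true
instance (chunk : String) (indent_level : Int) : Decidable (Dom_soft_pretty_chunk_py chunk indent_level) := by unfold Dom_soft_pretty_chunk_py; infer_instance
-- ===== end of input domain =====

-- B replaces A's per-character in_string/escape boolean state by a nested scan that
-- consumes each whole string literal at once (objective: simpler decomposition, same cost).

-- ===== PORT A =====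
-- "  " * indent_level (empty for non-positive levels, as in Python)
def pvIndent (n : Int) : List Char := List.replicate (2 * n.toNat) ' '

-- A's while loop: state = (remaining suffix of chunk, indent_level, in_string, escape, out)
def pvLoopA : List Char → Int → Bool → Bool → List Char → List Char × Int
  | [], ind, _, _, out => (out, ind)
  | ch :: rest, ind, inStr, esc, out =>
    if inStr then
      let out2 := out ++ [ch]
      if esc then pvLoopA rest ind true false out2
      else if ch = '\\' then pvLoopA rest ind true true out2
      else if ch = '"' then pvLoopA rest ind false false out2
      else pvLoopA rest ind true false out2
    else if ch = '"' then pvLoopA rest ind true false (out ++ [ch])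
    else if ch = '{' ∨ ch = '[' then
      pvLoopA rest (ind + 1) false false (out ++ [ch, '\n'] ++ pvIndent (ind + 1))
    else if ch = '}' ∨ ch = ']' then
      pvLoopA rest (max 0 (ind - 1)) false false (out ++ ['\n'] ++ pvIndent (max 0 (ind - 1)) ++ [ch])
    else if ch = ',' then pvLoopA rest ind false false (out ++ [ch, '\n'] ++ pvIndent ind)
    else pvLoopA rest ind false false (out ++ [ch])

def soft_pretty_chunk_py (chunk : String) (indent_level : Int) : String × Int :=
  let r := pvLoopA chunk.toList indent_level false false []
  (String.ofList r.1, r.2)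

-- ===== PORT B =====
-- B's inner loop: consume a string literal body after its opening quote;
-- returns (characters appended, remaining suffix of the chunk)
def pvConsumeStr : List Char → List Char × List Char
  | [] => ([], [])
  | c :: rest =>
    if c = '\\' then
      match rest with
      | [] => ([c], [])
      | c2 :: rest' =>
        let p := pvConsumeStr rest'
        (c :: c2 :: p.1, p.2)
    else if c = '"' then ([c], rest)
    else
      let p := pvConsumeStr rest
      (c :: p.1, p.2)

-- needed by pvLoopB's termination proof
theorem pvConsumeStr_len : ∀ l : List Char, (pvConsumeStr l).2.length ≤ l.length := by
  have key : ∀ n, ∀ l : List Char, l.length ≤ n → (pvConsumeStr l).2.length ≤ l.length := by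
    intro n
    induction n with
    | zero =>
      intro l hl
      have : l = [] := List.length_eq_zero_iff.mp (Nat.le_zero.mp hl)
      subst this
      rw [pvConsumeStr.eq_def]
    | succ n ih =>
      intro l hl
      match l with
      | [] => rw [pvConsumeStr.eq_def]
      | c :: rest =>
        by_cases hb : c = '\\'
        · subst hb
          match rest with
          | [] => rw [pvConsumeStr.eq_def]; simp
          | c2 :: rest' =>
            have h := ih rest' (by simp at hl ⊢; omega)
            rw [pvConsumeStr.eq_def]; simp; omega
        · by_cases hq : c = '"'
          · subst hq; rw [pvConsumeStr.eq_def]; simp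
          · have h := ih rest (by simp at hl ⊢; omega)
            rw [pvConsumeStr.eq_def]; simp [hb, hq]; omega
  exact fun l => key l.length l le_rfl

-- B's outer loop (no string-state booleans)
def pvLoopB : List Char → Int → List Char → List Char × Int
  | [], ind, out => (out, ind)
  | ch :: rest, ind, out =>
    if ch = '"' then
      let p := pvConsumeStr rest
      pvLoopB p.2 ind (out ++ ch :: p.1)
    else if ch = '{' ∨ ch = '[' then
      pvLoopB rest (ind + 1) (out ++ ch :: '\n' :: pvIndent (ind + 1))
    else if ch = '}' ∨ ch = ']' then
      pvLoopB rest (max 0 (ind - 1)) (out ++ '\n' :: (pvIndent (max 0 (ind - 1)) ++ [ch]))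
    else if ch = ',' then pvLoopB rest ind (out ++ ch :: '\n' :: pvIndent ind)
    else pvLoopB rest ind (out ++ [ch])
  termination_by l => l.length
  decreasing_by
    · exact Nat.lt_succ_of_le (pvConsumeStr_len rest)
    all_goals simp

def soft_pretty_chunk_py_alt (chunk : String) (indent_level : Int) : String × Int :=
  let r := pvLoopB chunk.toList indent_level []
  (String.ofList r.1, r.2)

-- ===== PRECONDITION & SPEC =====
def Spec_soft_pretty_chunk_py (chunk : String) (indent_level : Int) (out : String × Int) : Prop := out = soft_pretty_chunk_py_alt chunk indent_level
instance (chunk : String) (indent_level : Int) (out : String × Int) : Decidable (Spec_soft_pretty_chunk_py chunk indent_level out) := by unfold Spec_soft_pretty_chunk_py; infer_instance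

-- ===== CLAIM (what is proved, stated in full; the proofs are below) =====
def Claim_equal_soft_pretty_chunk_py : Prop := ∀ (chunk : String) (indent_level : Int), Dom_soft_pretty_chunk_py chunk indent_level → Spec_soft_pretty_chunk_py chunk indent_level (soft_pretty_chunk_py chunk indent_level)

-- ===== LEMMAS AND PROOFS =====

-- step lemmas for pvConsumeStr
theorem pvConsume_other {c : Char} (rest : List Char) (hb : ¬ c = '\\') (hq : ¬ c = '"') :
    pvConsumeStr (c :: rest) = (c :: (pvConsumeStr rest).1, (pvConsumeStr rest).2) := by
  rw [pvConsumeStr.eq_def]; simp [hb, hq]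

theorem pvConsume_quote (rest : List Char) : pvConsumeStr ('"' :: rest) = (['"'], rest) := by
  rw [pvConsumeStr.eq_def]; simp

theorem pvConsume_bs_nil : pvConsumeStr ['\\'] = (['\\'], []) := by
  rw [pvConsumeStr.eq_def]; simp

theorem pvConsume_bs_cons (c2 : Char) (rest' : List Char) :
    pvConsumeStr ('\\' :: c2 :: rest') =
      ('\\' :: c2 :: (pvConsumeStr rest').1, (pvConsumeStr rest').2) := by
  rw [pvConsumeStr.eq_def]; simp

-- step lemma for pvLoopB
theorem pvLoopB_cons (c : Char) (rest : List Char) (ind : Int) (out : List Char) :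
    pvLoopB (c :: rest) ind out =
      if c = '"' then
        pvLoopB (pvConsumeStr rest).2 ind (out ++ c :: (pvConsumeStr rest).1)
      else if c = '{' ∨ c = '[' then
        pvLoopB rest (ind + 1) (out ++ c :: '\n' :: pvIndent (ind + 1))
      else if c = '}' ∨ c = ']' then
        pvLoopB rest (max 0 (ind - 1)) (out ++ '\n' :: (pvIndent (max 0 (ind - 1)) ++ [c]))
      else if c = ',' then pvLoopB rest ind (out ++ c :: '\n' :: pvIndent ind)
      else pvLoopB rest ind (out ++ [c]) := by
  rw [pvLoopB.eq_def]

-- step lemmas for pvLoopA (structural, so these are definitional)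
theorem pvLoopA_false (c : Char) (rest : List Char) (ind : Int) (out : List Char) :
    pvLoopA (c :: rest) ind false false out =
      (if c = '"' then pvLoopA rest ind true false (out ++ [c])
       else if c = '{' ∨ c = '[' then
         pvLoopA rest (ind + 1) false false (out ++ [c, '\n'] ++ pvIndent (ind + 1))
       else if c = '}' ∨ c = ']' then
         pvLoopA rest (max 0 (ind - 1)) false false (out ++ ['\n'] ++ pvIndent (max 0 (ind - 1)) ++ [c])
       else if c = ',' then pvLoopA rest ind false false (out ++ [c, '\n'] ++ pvIndent ind)
       else pvLoopA rest ind false false (out ++ [c])) := by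
  simp [pvLoopA]

theorem pvLoopA_true (c : Char) (rest : List Char) (ind : Int) (out : List Char) :
    pvLoopA (c :: rest) ind true false out =
      (if c = '\\' then pvLoopA rest ind true true (out ++ [c])
       else if c = '"' then pvLoopA rest ind false false (out ++ [c])
       else pvLoopA rest ind true false (out ++ [c])) := by
  simp [pvLoopA]

theorem pvLoopA_esc (c : Char) (rest : List Char) (ind : Int) (out : List Char) :
    pvLoopA (c :: rest) ind true true out = pvLoopA rest ind true false (out ++ [c]) := by
  simp [pvLoopA]

-- Both facts at once, by strong induction on the suffix length: outside a string A's
-- loop equals B's loop, and inside a string (escape off) A's per-char scanning equals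
-- B's pvConsumeStr followed by B's loop on the remainder.
theorem pvLoop_agree : ∀ n : Nat, ∀ l : List Char, l.length ≤ n →
    (∀ ind out, pvLoopA l ind false false out = pvLoopB l ind out) ∧
    (∀ ind out, pvLoopA l ind true false out =
      pvLoopB (pvConsumeStr l).2 ind (out ++ (pvConsumeStr l).1)) := by
  intro n
  induction n with
  | zero =>
    intro l hl
    have : l = [] := List.length_eq_zero_iff.mp (Nat.le_zero.mp hl)
    subst this
    rw [pvConsumeStr.eq_def]
    simp [pvLoopA, pvLoopB]
  | succ n ih =>
    intro l hl
    cases l with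
    | nil =>
      rw [pvConsumeStr.eq_def]
      simp [pvLoopA, pvLoopB]
    | cons c rest =>
      have hrest : rest.length ≤ n := by simp at hl; omega
      constructor
      · intro ind out
        by_cases hq : c = '"'
        · subst hq
          rw [pvLoopA_false, if_pos rfl, (ih rest hrest).2 ind (out ++ ['"']),
              pvLoopB_cons, if_pos rfl]
          simp
        · rw [pvLoopA_false, if_neg hq, pvLoopB_cons, if_neg hq]
          split_ifs <;> rw [(ih rest hrest).1] <;> simp
      · intro ind out
        by_cases hb : c = '\\'
        · subst hb
          cases rest with
          | nil =>
            rw [pvConsume_bs_nil, pvLoopA_true, if_pos rfl, pvLoopB.eq_def]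
            simp [pvLoopA]
          | cons c2 rest' =>
            have hrest' : rest'.length ≤ n := by simp at hl; omega
            rw [pvConsume_bs_cons, pvLoopA_true, if_pos rfl, pvLoopA_esc,
                (ih rest' hrest').2]
            simp
        · by_cases hq : c = '"'
          · subst hq
            rw [pvConsume_quote, pvLoopA_true, if_neg hb, if_pos rfl,
                (ih rest hrest).1]
          · rw [pvConsume_other rest hb hq, pvLoopA_true, if_neg hb, if_neg hq,
                (ih rest hrest).2]
            simp

-- ===== VERDICT (by name: the statement is the Claim_ definition above) =====
theorem soft_pretty_chunk_py_spec : Claim_equal_soft_pretty_chunk_py := by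
  intro chunk indent_level _
  unfold Spec_soft_pretty_chunk_py soft_pretty_chunk_py soft_pretty_chunk_py_alt
  rw [(pvLoop_agree chunk.toList.length chunk.toList le_rfl).1 indent_level []]
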